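-- pv_equiv track=rewrite | github.com/Leandre-B/Fac | P4/Python/TP9/bubble_sort.py | tri_chelou
-- ===== SOURCE A (Python) =====
-- def tri_chelou (t):
--    for i in range(len(t)-1):
--       for j in range(i+1,len(t)-1):
--          if t[i]>t[j] :
--             aux=t[j]
--             t[j]=t[i]
--             t[i]=aux
--    return t
-- ===== SOURCE B (Python) =====
-- def tri_chelou(t):
--     # Idiomatic: the prefix t[:-1] sorted, last element left in place.
--     # Returns a new list (A mutates t in place; return value is identical).
--     return sorted(t[:-1]) + t[-1:]
-- ===== Notes on version B (the rewrite author's own statement) =====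
-- stated objective: idiomatic
-- what changed: A's quadratic exchange-sort loops over indices are replaced by a one-line sorted(t[:-1]) + t[-1:] (Timsort via the built-in), keeping the last element untouched; B returns a new list instead of mutating t in place.
import Mathlib
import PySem

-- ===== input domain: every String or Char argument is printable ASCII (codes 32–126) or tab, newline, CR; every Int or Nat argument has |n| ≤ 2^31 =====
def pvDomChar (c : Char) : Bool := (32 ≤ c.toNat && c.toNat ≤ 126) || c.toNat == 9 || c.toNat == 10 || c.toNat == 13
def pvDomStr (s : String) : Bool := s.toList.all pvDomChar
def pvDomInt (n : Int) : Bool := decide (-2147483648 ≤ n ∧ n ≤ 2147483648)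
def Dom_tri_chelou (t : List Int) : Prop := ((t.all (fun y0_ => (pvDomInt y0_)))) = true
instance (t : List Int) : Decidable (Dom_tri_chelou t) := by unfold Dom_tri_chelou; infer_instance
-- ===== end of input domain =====

-- B replaces A's quadratic index-swap loops by the idiomatic sorted(t[:-1]) + t[-1:]
-- (B returns a new list; A mutates t in place — the equivalence is about the return value).

-- ===== PORT A =====
-- inner loop body: if t[i] > t[j]: aux = t[j]; t[j] = t[i]; t[i] = aux
def triInnerStep (i : Int) (t : List Int) (j : Int) : List Int :=
  if PySem.List.pyGetD t i 0 > PySem.List.pyGetD t j 0 then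
    let aux := PySem.List.pyGetD t j 0
    let t1 := PySem.List.pySetD t j (PySem.List.pyGetD t i 0)
    PySem.List.pySetD t1 i aux
  else t

def tri_chelou (t : List Int) : List Int :=
  (PySem.List.pyRange 0 (PySem.List.len t - 1) 1).foldl
    (fun t i =>
      (PySem.List.pyRange (i + 1) (PySem.List.len t - 1) 1).foldl (triInnerStep i) t)
    t

-- ===== PORT B =====
def tri_chelou_alt (t : List Int) : List Int :=
  PySem.List.sorted (PySem.List.slice t none (some (-1))) (fun x => x) false
    ++ PySem.List.slice t (some (-1)) none

-- ===== PRECONDITION & SPEC =====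
def Spec_tri_chelou (t : List Int) (out : List Int) : Prop := out = tri_chelou_alt t
instance (t : List Int) (out : List Int) : Decidable (Spec_tri_chelou t out) := by unfold Spec_tri_chelou; infer_instance

-- ===== CLAIM (what is proved, stated in full; the proofs are below) =====
def Claim_equal_tri_chelou : Prop := ∀ (t : List Int), Dom_tri_chelou t → Spec_tri_chelou t (tri_chelou t)

-- ===== LEMMAS AND PROOFS =====

-- Structural description of A's inner loop: scan the segment holding the current
-- value of slot i; each compare-swap puts the larger element back in the slot.
def innerL : Int → List Int → Int × List Int
  | x, [] => (x, [])
  | x, y :: ys =>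
    if x > y then
      let p := innerL y ys; (p.1, x :: p.2)
    else
      let p := innerL x ys; (p.1, y :: p.2)

theorem innerL_cons_pos {x y : Int} (ys : List Int) (h : x > y) :
    innerL x (y :: ys) = ((innerL y ys).1, x :: (innerL y ys).2) := by
  simp [innerL, h]

theorem innerL_cons_neg {x y : Int} (ys : List Int) (h : ¬ x > y) :
    innerL x (y :: ys) = ((innerL x ys).1, y :: (innerL x ys).2) := by
  simp [innerL, h]

theorem innerL_length (x : Int) (ys : List Int) : (innerL x ys).2.length = ys.length := by
  induction ys generalizing x with
  | nil => rfl
  | cons y ys ih => simp only [innerL]; split <;> simp [ih]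

-- Structural description of A's outer loop (exchange sort of the prefix).
def exchS : List Int → List Int
  | [] => []
  | x :: xs =>
    let p := innerL x xs
    p.1 :: exchS p.2
termination_by l => l.length
decreasing_by simp [innerL_length]

theorem exchS_cons (x : Int) (xs : List Int) :
    exchS (x :: xs) = (innerL x xs).1 :: exchS (innerL x xs).2 := by
  rw [exchS]

theorem innerL_perm (x : Int) (ys : List Int) :
    ((innerL x ys).1 :: (innerL x ys).2).Perm (x :: ys) := by
  induction ys generalizing x with
  | nil => rfl
  | cons y ys ih =>
    by_cases h : x > y
    · rw [innerL_cons_pos ys h]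
      exact (List.Perm.swap x _ _).trans ((ih y).cons x)
    · rw [innerL_cons_neg ys h]
      exact ((List.Perm.swap y _ _).trans ((ih x).cons y)).trans (List.Perm.swap x y ys)

theorem innerL_min (x : Int) (ys : List Int) :
    (innerL x ys).1 ≤ x ∧ ∀ z ∈ (innerL x ys).2, (innerL x ys).1 ≤ z := by
  induction ys generalizing x with
  | nil => simp [innerL]
  | cons y ys ih =>
    by_cases h : x > y
    · rw [innerL_cons_pos ys h]
      dsimp only
      obtain ⟨h1, h2⟩ := ih y
      refine ⟨by omega, ?_⟩
      intro z hz
      rcases List.mem_cons.1 hz with rfl | hz'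
      · omega
      · exact h2 z hz'
    · rw [innerL_cons_neg ys h]
      dsimp only
      obtain ⟨h1, h2⟩ := ih x
      refine ⟨h1, ?_⟩
      intro z hz
      rcases List.mem_cons.1 hz with rfl | hz'
      · omega
      · exact h2 z hz'

theorem exchS_perm_aux (n : Nat) : ∀ l : List Int, l.length ≤ n → (exchS l).Perm l := by
  induction n with
  | zero =>
    intro l h
    have : l = [] := List.eq_nil_of_length_eq_zero (by omega)
    subst this; simp [exchS]
  | succ n ih =>
    intro l h
    rcases l with _ | ⟨x, xs⟩
    · simp [exchS]
    · rw [exchS_cons]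
      have hlen : (innerL x xs).2.length ≤ n := by rw [innerL_length]; simpa using h
      exact ((ih _ hlen).cons _).trans (innerL_perm x xs)

theorem exchS_perm (l : List Int) : (exchS l).Perm l := exchS_perm_aux l.length l le_rfl

theorem exchS_pairwise_aux (n : Nat) : ∀ l : List Int, l.length ≤ n → (exchS l).Pairwise (· ≤ ·) := by
  induction n with
  | zero =>
    intro l h
    have : l = [] := List.eq_nil_of_length_eq_zero (by omega)
    subst this; simp [exchS]
  | succ n ih =>
    intro l h
    rcases l with _ | ⟨x, xs⟩
    · simp [exchS]
    · rw [exchS_cons]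
      have hlen : (innerL x xs).2.length ≤ n := by rw [innerL_length]; simpa using h
      refine List.Pairwise.cons ?_ (ih _ hlen)
      intro z hz
      have hz' : z ∈ (innerL x xs).2 := (exchS_perm _).mem_iff.1 hz
      exact (innerL_min x xs).2 z hz'

theorem exchS_pairwise (l : List Int) : (exchS l).Pairwise (· ≤ ·) :=
  exchS_pairwise_aux l.length l le_rfl

-- positional read/write in the middle of an appended list (used by the bridges)
theorem getD_mid (pre rest : List Int) (w d : Int) :
    (pre ++ w :: rest).getD pre.length d = w := by
  simp [List.getD_eq_getElem?_getD]

theorem set_mid (pre rest : List Int) (w v : Int) :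
    (pre ++ w :: rest).set pre.length v = pre ++ v :: rest := by
  simp [List.set_append_right]

-- The inner index loop, bridged to innerL: the holder sits at slot |pre|, the
-- already-scanned part 'done' lies between it and the unscanned segment 'seg'.
theorem innerBridge (seg : List Int) : ∀ (done pre : List Int) (x z : Int),
    (PySem.List.pyRange ((pre.length : Int) + 1 + done.length)
        ((pre.length : Int) + 1 + done.length + seg.length) 1).foldl
      (triInnerStep (pre.length : Int)) (pre ++ x :: (done ++ seg) ++ [z])
    = pre ++ (innerL x seg).1 :: (done ++ (innerL x seg).2) ++ [z] := by
  induction seg with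
  | nil =>
    intro done pre x z
    rw [PySem.List.pyRange_one_eq_nil (by simp)]
    simp [innerL]
  | cons y ys ih =>
    intro done pre x z
    rw [PySem.List.pyRange_one_cons (by push_cast [List.length_cons]; omega)]
    simp only [List.foldl_cons]
    have hidx : ((pre.length : Int) + 1 + (done.length : Int))
        = (((pre ++ x :: done).length : Nat) : Int) := by
      push_cast [List.length_append, List.length_cons]; ring
    have hL : pre ++ x :: (done ++ y :: ys) ++ [z] = (pre ++ x :: done) ++ y :: (ys ++ [z]) := by
      simp
    have hxg : PySem.List.pyGetD (pre ++ x :: (done ++ y :: ys) ++ [z]) ((pre.length : Int)) 0 = x := by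
      rw [show pre ++ x :: (done ++ y :: ys) ++ [z] = pre ++ x :: ((done ++ y :: ys) ++ [z]) by simp,
        PySem.List.pyGetD_natCast]
      exact getD_mid _ _ _ _
    have hyg : PySem.List.pyGetD (pre ++ x :: (done ++ y :: ys) ++ [z])
        ((pre.length : Int) + 1 + done.length) 0 = y := by
      rw [hidx, hL, PySem.List.pyGetD_natCast]
      exact getD_mid _ _ _ _
    by_cases h : x > y
    · have e1 : PySem.List.pySetD (pre ++ x :: (done ++ y :: ys) ++ [z])
          ((pre.length : Int) + 1 + done.length) x = (pre ++ x :: done) ++ x :: (ys ++ [z]) := by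
        rw [hidx, hL, PySem.List.pySetD_natCast]
        exact set_mid _ _ _ _
      have e2 : PySem.List.pySetD ((pre ++ x :: done) ++ x :: (ys ++ [z])) ((pre.length : Int)) y
          = pre ++ y :: ((done ++ [x]) ++ ys) ++ [z] := by
        rw [show (pre ++ x :: done) ++ x :: (ys ++ [z]) = pre ++ x :: (done ++ x :: (ys ++ [z])) by simp,
          PySem.List.pySetD_natCast, set_mid]
        simp
      have hstep : triInnerStep ((pre.length : Int)) (pre ++ x :: (done ++ y :: ys) ++ [z])
          ((pre.length : Int) + 1 + done.length) = pre ++ y :: ((done ++ [x]) ++ ys) ++ [z] := by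
        simp only [triInnerStep, hxg, hyg]
        rw [if_pos h, e1, e2]
      rw [hstep, innerL_cons_pos ys h]
      dsimp only
      simpa [List.append_assoc, add_assoc, add_comm, add_left_comm] using ih (done ++ [x]) pre y z
    · have hstep : triInnerStep ((pre.length : Int)) (pre ++ x :: (done ++ y :: ys) ++ [z])
          ((pre.length : Int) + 1 + done.length) = pre ++ x :: ((done ++ [y]) ++ ys) ++ [z] := by
        simp only [triInnerStep, hxg, hyg]
        rw [if_neg h]
        simp
      rw [hstep, innerL_cons_neg ys h]
      dsimp only
      simpa [List.append_assoc, add_assoc, add_comm, add_left_comm] using ih (done ++ [y]) pre x z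

-- The outer index loop, bridged to exchS.
theorem outerBridge_aux (n : Nat) : ∀ (rest : List Int), rest.length ≤ n → ∀ (pre : List Int) (z : Int),
    (PySem.List.pyRange (pre.length : Int) ((pre.length : Int) + rest.length) 1).foldl
      (fun t i =>
        (PySem.List.pyRange (i + 1) (PySem.List.len t - 1) 1).foldl (triInnerStep i) t)
      (pre ++ rest ++ [z])
    = pre ++ exchS rest ++ [z] := by
  induction n with
  | zero =>
    intro rest h pre z
    have : rest = [] := List.eq_nil_of_length_eq_zero (by omega)
    subst this
    rw [PySem.List.pyRange_one_eq_nil (by simp)]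
    simp [exchS]
  | succ n ih =>
    intro rest h pre z
    rcases rest with _ | ⟨x, xs⟩
    · rw [PySem.List.pyRange_one_eq_nil (by simp)]
      simp [exchS]
    · rw [PySem.List.pyRange_one_cons (by push_cast [List.length_cons]; omega)]
      simp only [List.foldl_cons]
      have hlen : PySem.List.len (pre ++ (x :: xs) ++ [z]) - 1
          = (pre.length : Int) + 1 + xs.length := by
        simp [PySem.List.len_eq]
        ring
      have hinner := innerBridge xs [] pre x z
      simp only [List.nil_append, List.length_nil, Nat.cast_zero, add_zero] at hinner
      rw [show pre ++ (x :: xs) ++ [z] = pre ++ x :: xs ++ [z] by simp, hlen, hinner]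
      have hl2 : (innerL x xs).2.length = xs.length := innerL_length x xs
      have hrec : (innerL x xs).2.length ≤ n := by rw [innerL_length]; simpa using h
      have hmain := ih (innerL x xs).2 hrec (pre ++ [(innerL x xs).1]) z
      rw [exchS_cons]
      rw [show pre ++ (innerL x xs).1 :: (innerL x xs).2 ++ [z]
            = (pre ++ [(innerL x xs).1]) ++ (innerL x xs).2 ++ [z] by simp]
      rw [show ((pre.length : Int) + 1) = (((pre ++ [(innerL x xs).1]).length : Nat) : Int) by simp]
      rw [show ((pre.length : Int) + ((x :: xs).length : Int))
            = ((pre ++ [(innerL x xs).1]).length : Int) + ((innerL x xs).2.length : Int) by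
          simp only [List.length_append, List.length_cons, List.length_nil, hl2]; push_cast; ring]
      rw [hmain]
      simp

-- ===== VERDICT (by name: the statement is the Claim_ definition above) =====
theorem tri_chelou_spec : Claim_equal_tri_chelou := by
  intro t _
  unfold Spec_tri_chelou tri_chelou tri_chelou_alt
  rcases List.eq_nil_or_concat t with rfl | ⟨p, z, rfl⟩
  · rw [PySem.List.pyRange_one_eq_nil (by simp [PySem.List.len_eq])]
    simp [PySem.List.slice_to_neg_one, PySem.List.slice_from_neg_one, PySem.List.sorted]
  · simp only [List.concat_eq_append]
    have hlen : PySem.List.len (p ++ [z]) - 1 = (p.length : Int) := by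
      simp [PySem.List.len_eq]
    rw [hlen, PySem.List.slice_to_neg_one, PySem.List.slice_from_neg_one]
    have hdl : (p ++ [z]).dropLast = p := by simp
    have hdr : (p ++ [z]).drop ((p ++ [z]).length - 1) = [z] := by
      simp
    rw [hdl, hdr]
    have hout := outerBridge_aux p.length p le_rfl [] z
    simp only [List.nil_append, List.length_nil, Nat.cast_zero, zero_add] at hout
    rw [hout]
    rw [PySem.List.sorted_id_eq_of_perm_of_pairwise p (exchS p) (exchS_perm p) (exchS_pairwise p)]
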